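-- pv_equiv track=rewrite | github.com/huggin/gfg | misc/reaching_heights.py | reaching_height
-- ===== SOURCE A (Python) =====
-- def reaching_height(n, arr):
--     # Complete the function
--
--     arr.sort()
--     ans = [0] * n
--     j, k = 0, n - 1
--
--     for i in range(0, n, 2):
--         ans[i] = arr[k]
--         k -= 1
--         if i + 1 == n:
--             break
--         ans[i + 1] = arr[j]
--         j += 1
--
--     # return [-1] if n > 1 and arr.count(arr[0]) == n else ans
--     # bug in test cases
--     return [-1] if n % 2 == 0 and arr.count(arr[0]) == n else ans
-- ===== SOURCE B (Python) =====
-- def reaching_height(n, arr):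
--     arr.sort()
--     if n % 2 == 0 and arr.count(arr[0]) == n:
--         return [-1]
--     highs = arr[n // 2:n][::-1]
--     lows = arr[:n // 2]
--     ans = []
--     for h, l in zip(highs, lows):
--         ans.append(h)
--         ans.append(l)
--     if len(highs) > len(lows):
--         ans.append(highs[-1])
--     return ans
-- ===== Notes on version B (the rewrite author's own statement) =====
-- stated objective: alternative
-- what changed: Replaces A's preallocated array filled by a two-pointer indexed loop with a slice-based decomposition: split the sorted list into the top (n+1)//2 values (reversed) and the bottom n//2 values, then interleave them by zipping; no index arithmetic or in-place writes into a preallocated list. Pre_ excludes exactly the inputs where A raises IndexError (n > len(arr), or empty arr with even n).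
import Mathlib
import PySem

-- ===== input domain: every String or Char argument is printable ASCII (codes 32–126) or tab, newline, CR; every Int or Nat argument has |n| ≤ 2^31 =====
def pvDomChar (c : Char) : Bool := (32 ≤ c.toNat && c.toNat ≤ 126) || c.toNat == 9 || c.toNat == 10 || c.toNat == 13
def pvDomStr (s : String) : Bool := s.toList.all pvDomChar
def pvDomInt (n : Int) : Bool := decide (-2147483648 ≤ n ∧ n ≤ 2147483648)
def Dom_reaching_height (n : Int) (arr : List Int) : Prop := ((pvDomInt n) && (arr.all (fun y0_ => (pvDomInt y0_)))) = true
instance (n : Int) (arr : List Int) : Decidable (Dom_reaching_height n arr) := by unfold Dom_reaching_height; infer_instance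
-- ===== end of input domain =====

-- B replaces A's two-pointer indexed fill of a preallocated array by slicing the sorted
-- list into its top and bottom halves and zipping them together (alternative decomposition,
-- same cost). Return-value equivalence only: both A and Source B sort `arr` in place alike.

-- ===== PORT A =====
-- the 'for i in range(0, n, 2)' loop with its break; state = (ans, j, k)
def pvLoopA (s : List Int) (n : Int) : List Int → List Int × Int × Int → List Int × Int × Int
  | [], st => st
  | i :: rest, (ans, j, k) =>
      let ans1 := ans.set i.toNat (PySem.List.pyGetD s k 0)
      if i + 1 = n then (ans1, j, k - 1)
      else pvLoopA s n rest (ans1.set (i + 1).toNat (PySem.List.pyGetD s j 0), j + 1, k - 1)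

def reaching_height (n : Int) (arr : List Int) : List Int :=
  let arr := PySem.List.sorted arr (fun x => x)
  let st := pvLoopA arr n (PySem.List.pyRange 0 n 2) (List.replicate n.toNat 0, 0, n - 1)
  if PySem.Int.mod n 2 = 0 ∧ (PySem.List.count arr (PySem.List.pyGetD arr 0 0) : Int) = n
  then [-1] else st.1

-- ===== PORT B =====
def reaching_height_alt (n : Int) (arr : List Int) : List Int :=
  let arr := PySem.List.sorted arr (fun x => x)
  if PySem.Int.mod n 2 = 0 ∧ (PySem.List.count arr (PySem.List.pyGetD arr 0 0) : Int) = n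
  then [-1]
  else
    let highs := (PySem.List.slice arr (some (PySem.Int.floordiv n 2)) (some n)).reverse
    let lows := PySem.List.slice arr none (some (PySem.Int.floordiv n 2))
    let ans := (highs.zip lows).foldl (fun a hl => a ++ [hl.1, hl.2]) []
    if lows.length < highs.length then ans ++ [PySem.List.pyGetD highs (-1) 0] else ans

-- ===== PRECONDITION & SPEC =====
-- Pre_ excludes exactly the inputs on which A raises IndexError: n > len(arr) (the loop
-- reads arr[n-1]), and the empty list with even n (arr[0] in the final check).
def Pre_reaching_height (n : Int) (arr : List Int) : Prop :=
  n ≤ arr.length ∧ (PySem.Int.mod n 2 = 0 → arr ≠ [])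
instance (n : Int) (arr : List Int) : Decidable (Pre_reaching_height n arr) := by
  unfold Pre_reaching_height; infer_instance
def pvWitness_reaching_height : Int × List Int := (3, [5, 1, 2])

def Spec_reaching_height (n : Int) (arr : List Int) (out : List Int) : Prop := out = reaching_height_alt n arr
instance (n : Int) (arr : List Int) (out : List Int) : Decidable (Spec_reaching_height n arr out) := by unfold Spec_reaching_height; infer_instance

-- ===== CLAIM (what is proved, stated in full; the proofs are below) =====
def Claim_equal_reaching_height : Prop := ∀ (n : Int) (arr : List Int), Dom_reaching_height n arr → Pre_reaching_height n arr → Spec_reaching_height n arr (reaching_height n arr)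

-- ===== LEMMAS AND PROOFS =====

-- the common value of both programs: s[k], s[j], s[k-1], s[j+1], … for r slots
def pvT (s : List Int) : Nat → Int → Int → List Int
  | 0, _, _ => []
  | 1, _, k => [PySem.List.pyGetD s k 0]
  | r + 2, j, k =>
      PySem.List.pyGetD s k 0 :: PySem.List.pyGetD s j 0 :: pvT s r (j + 1) (k - 1)

lemma pv_range2_nil (a n : Int) (h : n ≤ a) : PySem.List.pyRange a n 2 = [] := by
  simp [PySem.List.pyRange, show ¬ a < n from by omega]

lemma pv_range2_cons (a n : Int) (h : a < n) :
    PySem.List.pyRange a n 2 = a :: PySem.List.pyRange (a + 2) n 2 := by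
  simp only [PySem.List.pyRange, if_neg (show ¬ (2:Int) = 0 by norm_num),
    if_pos (show (0:Int) < 2 by norm_num), if_pos h]
  by_cases h2 : a + 2 < n
  · rw [if_pos h2]
    have hc : ((n - a + 2 - 1) / 2).toNat = ((n - (a + 2) + 2 - 1) / 2).toNat + 1 := by omega
    rw [hc, List.range_succ_eq_map, List.map_cons, List.map_map]
    refine congrArg₂ _ (by ring) ?_
    apply List.map_congr_left
    intro k _
    simp only [Function.comp_apply]
    push_cast
    ring
  · rw [if_neg h2]
    have hc : ((n - a + 2 - 1) / 2).toNat = 1 := by omega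
    rw [hc]
    simp

lemma pv_set_last (l : List Int) (i : Nat) (v : Int) (h : i + 1 = l.length) :
    l.set i v = l.take i ++ [v] := by
  have hti : (l.take i).length = i := by rw [List.length_take]; omega
  refine List.ext_getElem ?_ ?_
  · simp only [List.length_set, List.length_append, List.length_take, List.length_cons,
      List.length_nil]
    omega
  intro m h1 h2
  rw [List.length_set] at h1
  simp only [List.length_append, hti, List.length_cons, List.length_nil] at h2
  simp only [List.getElem_set, List.getElem_append]
  rcases Nat.lt_or_ge m i with hm | hm
  · rw [if_neg (by omega), dif_pos (by omega)]
    simp [List.getElem_take]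
  · have hmi : m = i := by omega
    subst hmi
    rw [if_pos rfl, dif_neg (by omega)]
    simp [hti]

lemma pv_take_set_set (l : List Int) (i : Nat) (v1 v2 : Int) (h : i + 1 < l.length) :
    ((l.set i v1).set (i + 1) v2).take (i + 2) = l.take i ++ [v1, v2] := by
  have hti : (l.take i).length = i := by rw [List.length_take]; omega
  refine List.ext_getElem ?_ ?_
  · simp only [List.length_take, List.length_set, List.length_append, List.length_cons,
      List.length_nil]
    omega
  intro m h1 h2
  have hm2 : m < i + 2 := by simp at h1; omega
  have hml : m < l.length := by omega
  rw [List.getElem_take]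
  simp only [List.getElem_set, List.getElem_append]
  rcases Nat.lt_or_ge m i with hm | hm
  · rw [if_neg (by omega), if_neg (by omega), dif_pos (by omega)]
    simp [List.getElem_take]
  · rcases Nat.eq_or_lt_of_le hm with hmi | hmi
    · subst hmi
      rw [if_neg (by omega), if_pos rfl, dif_neg (by omega)]
      simp [hti]
    · have hmi1 : m = i + 1 := by omega
      subst hmi1
      rw [if_pos rfl, dif_neg (by omega)]
      simp [hti]

lemma pv_loopA_spec (s : List Int) (n : Int) :
    ∀ (r : Nat) (a j k : Int) (ans : List Int),
      0 ≤ a → a ≤ n → ans.length = n.toNat → (n - a).toNat = r →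
      (pvLoopA s n (PySem.List.pyRange a n 2) (ans, j, k)).1
        = ans.take a.toNat ++ pvT s r j k := by
  intro r
  induction r using Nat.strong_induction_on with
  | _ r ih =>
    intro a j k ans ha han hlen hr
    rcases r with _ | _ | r
    · have hna : n ≤ a := by omega
      rw [pv_range2_nil a n hna]
      simp only [pvLoopA, pvT, List.append_nil]
      rw [List.take_of_length_le (by omega)]
    · have h1 : a + 1 = n := by omega
      rw [pv_range2_cons a n (by omega)]
      simp only [pvLoopA]
      rw [if_pos h1]
      simp only [pvT]
      exact pv_set_last ans a.toNat _ (by omega)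
    · have hlt : a < n := by omega
      have hne : ¬ a + 1 = n := by omega
      rw [pv_range2_cons a n hlt]
      simp only [pvLoopA]
      rw [if_neg hne]
      rw [ih r (by omega) (a + 2) (j + 1) (k - 1) _ (by omega) (by omega) (by simp [hlen])
        (by omega)]
      have h2 : (a + 2).toNat = a.toNat + 2 := by omega
      have h1 : (a + 1).toNat = a.toNat + 1 := by omega
      rw [h2, h1, pv_take_set_set ans a.toNat _ _ (by omega)]
      simp [pvT]

lemma pvA_eq (s : List Int) (n : Int) (hn : 0 ≤ n) :
    (pvLoopA s n (PySem.List.pyRange 0 n 2) (List.replicate n.toNat 0, 0, n - 1)).1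
      = pvT s n.toNat 0 (n - 1) := by
  have h := pv_loopA_spec s n n.toNat 0 0 (n - 1) (List.replicate n.toNat 0) le_rfl hn
    (by simp) (by omega)
  simpa using h

lemma pvB_eq (s : List Int) :
    ∀ (r b j f : Nat), j ≤ f → f ≤ b → b ≤ s.length →
      (b - f) + (f - j) = r → (b - f) ≤ (f - j) + 1 → (f - j) ≤ (b - f) →
      (if ((s.drop j).take (f - j)).length < (((s.drop f).take (b - f)).reverse).length
       then ((((s.drop f).take (b - f)).reverse).zip ((s.drop j).take (f - j))).flatMap
              (fun p => [p.1, p.2])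
            ++ [PySem.List.pyGetD (((s.drop f).take (b - f)).reverse) (-1) 0]
       else ((((s.drop f).take (b - f)).reverse).zip ((s.drop j).take (f - j))).flatMap
              (fun p => [p.1, p.2]))
      = pvT s r (j : Int) ((b : Int) - 1) := by
  intro r
  induction r using Nat.strong_induction_on with
  | _ r ih =>
    intro b j f hjf hfb hbl hsum hbal1 hbal2
    rcases r with _ | _ | r
    · have hbf : b - f = 0 := by omega
      have hfj : f - j = 0 := by omega
      simp [hbf, hfj, pvT]
    · have hbf : b - f = 1 := by omega
      have hfj : f - j = 0 := by omega
      have hfl : f < s.length := by omega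
      have hget : (s.drop f).take 1 = [s[f]] := by
        rw [List.drop_eq_getElem_cons hfl]
        rfl
      rw [hbf, hfj, hget]
      have h1 : (b : Int) - 1 = ((f : Nat) : Int) := by omega
      simp only [pvT, h1, PySem.List.pyGetD_natCast]
      rw [List.getD_eq_getElem _ _ hfl]
      simp [PySem.List.pyGetD_neg_one]
    · have hbf1 : 1 ≤ b - f := by omega
      have hfj1 : 1 ≤ f - j := by omega
      have hjl : j < s.length := by omega
      have hb1l : b - 1 < s.length := by omega
      -- highs = s[b-1] :: highs'
      have hhs : (s.drop f).take (b - f)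
          = (s.drop f).take (b - 1 - f) ++ [s[b - 1]] := by
        have h1 : b - f = (b - 1 - f) + 1 := by omega
        rw [h1, List.take_add_one]
        have h2 : (s.drop f)[b - 1 - f]? = some s[b - 1] := by
          rw [List.getElem?_drop, List.getElem?_eq_getElem (show f + (b - 1 - f) < s.length by omega)]
          simp only [show f + (b - 1 - f) = b - 1 from by omega]
        simp only [h2, Option.toList_some]
      -- lows = s[j] :: lows'
      have hls : (s.drop j).take (f - j)
          = s[j] :: (s.drop (j + 1)).take (f - (j + 1)) := by
        rw [List.drop_eq_getElem_cons hjl]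
        have h1 : f - j = (f - (j + 1)) + 1 := by omega
        rw [h1, List.take_succ_cons]
      have hrevapp : ((s.drop f).take (b - 1 - f) ++ [s[b - 1]]).reverse
          = s[b - 1] :: ((s.drop f).take (b - 1 - f)).reverse := by simp
      rw [hhs, hls, hrevapp, List.zip_cons_cons, List.flatMap_cons]
      have hLhs' : (((s.drop f).take (b - 1 - f)).reverse).length = b - 1 - f := by
        rw [List.length_reverse, List.length_take, List.length_drop]; omega
      have hLls' : ((s.drop (j + 1)).take (f - (j + 1))).length = f - (j + 1) := by
        rw [List.length_take, List.length_drop]; omega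
      have hIH := ih r (by omega) (b - 1) (j + 1) f (by omega) (by omega) (by omega)
        (by omega) (by omega) (by omega)
      have ej : ((j : Nat) : Int) + 1 = (((j + 1 : Nat) : Nat) : Int) := by omega
      have eb : ((b : Nat) : Int) - 1 - 1 = (((b - 1 : Nat) : Nat) : Int) - 1 := by omega
      have hget1 : PySem.List.pyGetD s ((b : Int) - 1) 0 = s[b - 1] := by
        rw [show ((b : Int) - 1) = ((b - 1 : Nat) : Int) from by omega,
          PySem.List.pyGetD_natCast, List.getD_eq_getElem _ _ hb1l]
      have hget2 : PySem.List.pyGetD s ((j : Nat) : Int) 0 = s[j] := by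
        rw [PySem.List.pyGetD_natCast, List.getD_eq_getElem _ _ hjl]
      by_cases hcond : f - j < b - f
      · have hc1 : ((s.drop (j + 1)).take (f - (j + 1))).length
            < (((s.drop f).take (b - 1 - f)).reverse).length := by
          rw [hLhs', hLls']; omega
        rw [if_pos hc1] at hIH
        have hc2 : (s[j] :: (s.drop (j + 1)).take (f - (j + 1))).length
            < (s[b - 1] :: ((s.drop f).take (b - 1 - f)).reverse).length := by
          simp only [List.length_cons, hLhs', hLls']; omega
        rw [if_pos hc2]
        have hne : ((s.drop f).take (b - 1 - f)).reverse ≠ [] := by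
          intro hnil
          have h0 := congrArg List.length hnil
          rw [hLhs'] at h0
          simp at h0
          omega
        have hgl : PySem.List.pyGetD
            (s[b - 1] :: ((s.drop f).take (b - 1 - f)).reverse) (-1) 0
            = PySem.List.pyGetD (((s.drop f).take (b - 1 - f)).reverse) (-1) 0 := by
          rw [PySem.List.pyGetD_neg_one _ _ (by simp), PySem.List.pyGetD_neg_one _ _ hne]
          exact List.getLast_cons hne
        rw [hgl]
        simp only [pvT, List.cons_append, List.nil_append]
        rw [hIH, hget1, hget2, ej, eb]
      · have hc1 : ¬ ((s.drop (j + 1)).take (f - (j + 1))).length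
            < (((s.drop f).take (b - 1 - f)).reverse).length := by
          rw [hLhs', hLls']; omega
        rw [if_neg hc1] at hIH
        have hc2 : ¬ (s[j] :: (s.drop (j + 1)).take (f - (j + 1))).length
            < (s[b - 1] :: ((s.drop f).take (b - 1 - f)).reverse).length := by
          simp only [List.length_cons, hLhs', hLls']; omega
        rw [if_neg hc2]
        simp only [pvT, List.cons_append, List.nil_append]
        rw [hIH, hget1, hget2, ej, eb]

-- ===== VERDICT (by name: the statement is the Claim_ definition above) =====
theorem reaching_height_spec : Claim_equal_reaching_height := by
  intro n arr _hdom hpre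
  obtain ⟨hlen, -⟩ := hpre
  simp only [Spec_reaching_height, reaching_height, reaching_height_alt]
  set s := PySem.List.sorted arr (fun x => x) with hsdef
  have hslen : s.length = arr.length := by rw [hsdef]; exact PySem.List.length_sorted ..
  by_cases hc : PySem.Int.mod n 2 = 0 ∧ (PySem.List.count s (PySem.List.pyGetD s 0 0) : Int) = n
  · rw [if_pos hc, if_pos hc]
  · rw [if_neg hc, if_neg hc]
    have hfd : PySem.Int.floordiv n 2 = n / 2 :=
      PySem.Int.floordiv_eq_ediv_of_pos (by norm_num)
    rcases Int.lt_or_le n 0 with hn | hn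
    · -- n < 0: A's loop never runs and ans = [0]*n = []; B's highs slice is empty
      have hfe : n ≤ PySem.Int.floordiv n 2 := by rw [hfd]; omega
      have hhs : PySem.List.slice s (some (PySem.Int.floordiv n 2)) (some n) = [] := by
        apply List.eq_nil_of_length_eq_zero
        rw [PySem.List.length_slice]
        have hmono : PySem.List.clampIdx s.length n
            ≤ PySem.List.clampIdx s.length (PySem.Int.floordiv n 2) := by
          simp only [PySem.List.clampIdx]
          split_ifs <;> omega
        omega
      rw [pv_range2_nil 0 n (by omega), hhs]
      have hnt : n.toNat = 0 := by omega
      rw [hnt]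
      simp [pvLoopA]
    · -- 0 ≤ n: both sides compute pvT s n.toNat 0 (n - 1)
      rw [pvA_eq s n hn]
      rw [show (n - 1) = ((n.toNat : Nat) : Int) - 1 from by omega]
      rw [show (some n : Option Int) = some ((n.toNat : Nat) : Int) from by congr 1; omega]
      rw [show PySem.Int.floordiv n 2 = ((n.toNat / 2 : Nat) : Int) from by rw [hfd]; omega]
      rw [PySem.List.slice_natCast, PySem.List.slice_to_natCast]
      simp only [PySem.List.foldl_append_eq_flatMap, List.nil_append]
      have hml : n.toNat ≤ s.length := by omega
      have hB := pvB_eq s n.toNat n.toNat 0 (n.toNat / 2) (by omega) (by omega) hml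
        (by omega) (by omega) (by omega)
      simp only [List.drop_zero, Nat.sub_zero, Nat.cast_zero] at hB
      exact hB.symm
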